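-- pv_equiv track=rewrite | github.com/andreasjansson/lspcmd | lspcmd/utils/text.py | offset_to_position
-- ===== SOURCE A (Python) =====
-- def offset_to_position(content: str, offset: int) -> tuple[int, int]:
--     lines = content.splitlines(keepends=True)
--     current = 0
--     for i, ln in enumerate(lines):
--         if current + len(ln) > offset:
--             return i, offset - current
--         current += len(ln)
--     return len(lines), 0
-- ===== SOURCE B (Python) =====
-- def offset_to_position(content: str, offset: int) -> tuple[int, int]:
--     lines = content.splitlines(keepends=True)
--     ends = []
--     total = 0
--     for ln in lines:
--         total += len(ln)
--         ends.append(total)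
--     lo, hi = 0, len(ends)
--     while lo < hi:  # bisect_right(ends, offset)
--         mid = (lo + hi) // 2
--         if ends[mid] <= offset:
--             lo = mid + 1
--         else:
--             hi = mid
--     if lo == len(lines):
--         return len(lines), 0
--     return lo, offset - (ends[lo - 1] if lo else 0)
-- ===== Notes on version B (the rewrite author's own statement) =====
-- stated objective: alternative
-- what changed: Replaces A's single accumulate-and-compare scan with early return by building a cumulative end-offset table and locating the line with a hand-written bisect_right binary search, the past-the-end case falling out of the search result.
import Mathlib
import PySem

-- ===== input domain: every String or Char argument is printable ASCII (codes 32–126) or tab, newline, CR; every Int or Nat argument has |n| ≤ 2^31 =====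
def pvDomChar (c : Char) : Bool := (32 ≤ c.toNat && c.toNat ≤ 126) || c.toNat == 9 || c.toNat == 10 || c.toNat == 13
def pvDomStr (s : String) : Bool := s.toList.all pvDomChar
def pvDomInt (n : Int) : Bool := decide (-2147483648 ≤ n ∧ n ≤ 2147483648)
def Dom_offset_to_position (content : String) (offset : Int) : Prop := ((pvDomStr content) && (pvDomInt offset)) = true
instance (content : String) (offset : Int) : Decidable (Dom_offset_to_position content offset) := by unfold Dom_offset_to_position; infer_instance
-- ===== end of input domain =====

-- B replaces A's linear accumulate-and-compare scan by a prefix-sum end-offset table plus a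
-- hand-written binary search (bisect_right); objective: alternative decomposition.

-- shared helper: content.splitlines(keepends=True), exact on the Dom character set
-- (the only line boundaries representable in Dom are '\n', '\r' and '\r\n')
def splitKE : List Char → List (List Char)
  | [] => []
  | '\n' :: rest => ['\n'] :: splitKE rest
  | '\r' :: '\n' :: rest => ['\r', '\n'] :: splitKE rest
  | '\r' :: rest => ['\r'] :: splitKE rest
  | c :: rest =>
    match splitKE rest with
    | [] => [[c]]
    | l :: ls => (c :: l) :: ls

-- ===== PORT A =====
-- the for-loop with early return, state (i, current)
def goA : List (List Char) → Int → Int → Int → Int × Int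
  | [], i, _, _ => (i, 0)
  | ln :: rest, i, current, offset =>
    if current + (ln.length : Int) > offset then (i, offset - current)
    else goA rest (i + 1) (current + (ln.length : Int)) offset

def offset_to_position (content : String) (offset : Int) : Int × Int :=
  goA (splitKE content.toList) 0 0 offset

-- ===== PORT B =====
-- the ends-building loop (total += len(ln); ends.append(total)) as the obvious structural recursion
def accumEnds : List (List Char) → Int → List Int
  | [], _ => []
  | ln :: rest, total => (total + (ln.length : Int)) :: accumEnds rest (total + (ln.length : Int))

-- the while-loop binary search (bisect_right); ends[mid] is always in range (lo < hi ≤ len), ported as getD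
def bsearch (ends : List Int) (offset : Int) (lo hi : Nat) : Nat :=
  if _h : lo < hi then
    let mid := (lo + hi) / 2
    if ends.getD mid 0 ≤ offset then bsearch ends offset (mid + 1) hi
    else bsearch ends offset lo mid
  else lo
termination_by hi - lo
decreasing_by all_goals omega

def offset_to_position_alt (content : String) (offset : Int) : Int × Int :=
  let lines := splitKE content.toList
  let ends := accumEnds lines 0
  let lo := bsearch ends offset 0 ends.length
  if lo = lines.length then ((lines.length : Int), 0)
  else ((lo : Int), offset - (if lo = 0 then 0 else ends.getD (lo - 1) 0))

-- ===== PRECONDITION & SPEC =====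
def Spec_offset_to_position (content : String) (offset : Int) (out : Int × Int) : Prop := out = offset_to_position_alt content offset
instance (content : String) (offset : Int) (out : Int × Int) : Decidable (Spec_offset_to_position content offset out) := by unfold Spec_offset_to_position; infer_instance

-- ===== CLAIM (what is proved, stated in full; the proofs are below) =====
def Claim_equal_offset_to_position : Prop := ∀ (content : String) (offset : Int), Dom_offset_to_position content offset → Spec_offset_to_position content offset (offset_to_position content offset)

-- ===== LEMMAS AND PROOFS =====

theorem accumEnds_length (L : List (List Char)) (c : Int) : (accumEnds L c).length = L.length := by
  induction L generalizing c with
  | nil => rfl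
  | cons ln rest ih => simp [accumEnds, ih]

theorem accumEnds_le (L : List (List Char)) (c : Int) : ∀ x ∈ accumEnds L c, c ≤ x := by
  induction L generalizing c with
  | nil => simp [accumEnds]
  | cons ln rest ih =>
    intro x hx
    simp only [accumEnds, List.mem_cons] at hx
    rcases hx with h | h
    · omega
    · have := ih (c + (ln.length : Int)) x h; omega

theorem accumEnds_sorted (L : List (List Char)) (c : Int) : List.Pairwise (· ≤ ·) (accumEnds L c) := by
  induction L generalizing c with
  | nil => simp [accumEnds]
  | cons ln rest ih =>
    refine List.pairwise_cons.mpr ⟨?_, ih _⟩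
    intro b hb
    have := accumEnds_le rest (c + (ln.length : Int)) b hb; omega

theorem sorted_getD_mono (ends : List Int) (hs : List.Pairwise (· ≤ ·) ends)
    (j k : Nat) (hjk : j ≤ k) (hk : k < ends.length) :
    ends.getD j 0 ≤ ends.getD k 0 := by
  rcases Nat.eq_or_lt_of_le hjk with rfl | hlt
  · exact le_refl _
  · have hj : j < ends.length := lt_trans hlt hk
    have := List.Pairwise.rel_get_of_lt hs (a := ⟨j, hj⟩) (b := ⟨k, hk⟩) (by simpa using hlt)
    simpa [List.getD_eq_getElem?_getD, List.getElem?_eq_getElem, hj, hk] using this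

-- binary-search invariant: the result r has everything below it ≤ offset and ends[r] > offset
theorem bsearch_spec (ends : List Int) (offset : Int) (hs : List.Pairwise (· ≤ ·) ends) :
    ∀ n lo hi, hi - lo ≤ n → lo ≤ hi → hi ≤ ends.length →
    (∀ j < lo, ends.getD j 0 ≤ offset) →
    (∀ j, hi ≤ j → j < ends.length → offset < ends.getD j 0) →
    (∀ j < bsearch ends offset lo hi, ends.getD j 0 ≤ offset) ∧
    (bsearch ends offset lo hi < ends.length → offset < ends.getD (bsearch ends offset lo hi) 0) ∧
    bsearch ends offset lo hi ≤ ends.length := by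
  intro n
  induction n with
  | zero =>
    intro lo hi hn hlh hhl hlow hhigh
    have : lo = hi := by omega
    subst this
    rw [bsearch]
    simp only [lt_irrefl, dite_false]
    exact ⟨hlow, fun h => hhigh lo (le_refl _) h, hhl⟩
  | succ n ih =>
    intro lo hi hn hlh hhl hlow hhigh
    rw [bsearch]
    by_cases h : lo < hi
    · simp only [h, dite_true]
      set mid := (lo + hi) / 2 with hmid
      have hmlt : mid < hi := by omega
      have hmge : lo ≤ mid := by omega
      by_cases hle : ends.getD mid 0 ≤ offset
      · simp only [hle, if_true]
        refine ih (mid + 1) hi (by omega) (by omega) hhl ?_ hhigh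
        intro j hj
        by_cases hjlo : j < lo
        · exact hlow j hjlo
        · exact le_trans (sorted_getD_mono ends hs j mid (by omega) (by omega)) hle
      · simp only [hle, if_false]
        refine ih lo mid (by omega) (by omega) (by omega) hlow ?_
        intro j hjm hjl
        have := sorted_getD_mono ends hs mid j hjm hjl
        omega
    · simp only [h, dite_false]
      have : lo = hi := by omega
      subst this
      exact ⟨hlow, fun hlt => hhigh lo (le_refl _) hlt, hhl⟩

-- A's scan equals the table-lookup form, for ANY index r with the bisect boundary properties
theorem goA_eq (L : List (List Char)) : ∀ (i c offset : Int) (r : Nat),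
    r ≤ L.length →
    (∀ j < r, (accumEnds L c).getD j 0 ≤ offset) →
    (r < L.length → offset < (accumEnds L c).getD r 0) →
    goA L i c offset =
      (if r = L.length then (i + (L.length : Int), 0)
       else (i + (r : Int), offset - (if r = 0 then c else (accumEnds L c).getD (r - 1) 0))) := by
  induction L with
  | nil =>
    intro i c offset r hr _ _
    have : r = 0 := by simpa using hr
    subst this
    simp [goA]
  | cons ln rest ih =>
    intro i c offset r hr hlow hhigh
    simp only [accumEnds] at hlow hhigh
    match r with
    | 0 =>
      have hlt : offset < c + (ln.length : Int) := by
        have := hhigh (by simp); simpa using this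
      simp only [goA, if_pos (by omega : c + (ln.length : Int) > offset)]
      simp [List.length_cons]
    | r' + 1 =>
      have h0 : c + (ln.length : Int) ≤ offset := by
        have := hlow 0 (by omega); simpa using this
      simp only [goA, if_neg (by omega : ¬ c + (ln.length : Int) > offset)]
      have hrest : r' ≤ rest.length := by
        have := hr; simp only [List.length_cons] at this; omega
      have hrec := ih (i + 1) (c + (ln.length : Int)) offset r' hrest
        (fun j hj => by have := hlow (j + 1) (by omega); simpa using this)
        (fun hlt => by
          have := hhigh (by simp only [List.length_cons]; omega)
          simpa using this)
      rw [hrec]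
      by_cases hend : r' = rest.length
      · simp only [hend, List.length_cons]
        simp [Prod.ext_iff]; ring
      · simp only [if_neg hend, List.length_cons, if_neg (by omega : ¬ r' + 1 = rest.length + 1)]
        refine Prod.ext ?_ ?_
        · simp; ring
        · simp only
          match r' with
          | 0 => simp [accumEnds]
          | r'' + 1 =>
            simp [accumEnds, List.getD_eq_getElem?_getD]

-- ===== VERDICT (by name: the statement is the Claim_ definition above) =====
theorem offset_to_position_spec : Claim_equal_offset_to_position := by
  intro content offset _
  simp only [Spec_offset_to_position, offset_to_position, offset_to_position_alt]
  generalize splitKE content.toList = L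
  have hlen := accumEnds_length L 0
  obtain ⟨hlow, hhigh, hle⟩ := bsearch_spec (accumEnds L 0) offset (accumEnds_sorted L 0)
    (accumEnds L 0).length 0 (accumEnds L 0).length (by omega) (by omega) (le_refl _)
    (fun j hj => absurd hj (Nat.not_lt_zero j)) (fun j hj hjl => absurd hjl (by omega))
  rw [goA_eq L 0 0 offset (bsearch (accumEnds L 0) offset 0 (accumEnds L 0).length)
    (by omega) hlow (fun h => hhigh (by omega))]
  by_cases hcase : bsearch (accumEnds L 0) offset 0 (accumEnds L 0).length = L.length
  · simp [hcase]
  · simp [hcase]
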